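-- pv_equiv track=rewrite | github.com/deepmroot/AIproject | cosmic_entropy.py | _trim_sprite
-- ===== SOURCE A (Python) =====
-- from typing import Dict, List, Sequence, Tuple
--
-- def _trim_sprite(sprite: List[str]) -> List[str]:
--     if not sprite:
--         return sprite
--     rows = [i for i, row in enumerate(sprite) if row.strip()]
--     if not rows:
--         return [" "]
--     top, bottom = rows[0], rows[-1]
--     block = sprite[top : bottom + 1]
--     left = None
--     right = None
--     for row in block:
--         for i, ch in enumerate(row):
--             if ch != " ":
--                 left = i if left is None else min(left, i)
--                 right = i if right is None else max(right, i)
--     if left is None or right is None: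
--         return [" "]
--     return [row[left : right + 1] for row in block]
-- ===== SOURCE B (Python) =====
-- def _trim_sprite(sprite):
--     if not sprite:
--         return sprite
--     rows = [i for i, row in enumerate(sprite) if row.strip()]
--     if not rows:
--         return [" "]
--     block = sprite[rows[0] : rows[-1] + 1]
--     maxlen = max(len(row) for row in block)
--     cols = [j for j in range(maxlen)
--             if any(j < len(row) and row[j] != " " for row in block)]
--     if not cols:
--         return [" "]
--     left, right = cols[0], cols[-1]
--     return [row[left : right + 1] for row in block]
-- ===== Notes on version B (the rewrite author's own statement) =====
-- stated objective: faster
-- what changed: Replaces A's row-major per-character double loop maintaining running min/max with None-sentinels by a column-major decomposition: build the explicit list of content columns over range(max row length) and take its first and last element, symmetric to the row computation.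
import Mathlib
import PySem

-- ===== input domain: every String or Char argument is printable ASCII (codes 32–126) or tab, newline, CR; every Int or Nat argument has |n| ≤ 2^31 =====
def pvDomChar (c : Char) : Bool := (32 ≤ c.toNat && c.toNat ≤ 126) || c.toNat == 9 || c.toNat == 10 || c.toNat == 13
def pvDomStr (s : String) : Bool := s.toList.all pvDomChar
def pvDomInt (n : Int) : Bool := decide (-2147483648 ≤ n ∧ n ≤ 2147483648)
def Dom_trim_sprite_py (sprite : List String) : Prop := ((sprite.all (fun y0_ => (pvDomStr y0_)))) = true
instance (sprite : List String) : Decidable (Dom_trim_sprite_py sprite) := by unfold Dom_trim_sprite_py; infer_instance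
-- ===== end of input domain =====

-- B replaces A's row-major running min/max character scan by a symmetric column-major
-- decomposition (an explicit list of content columns, take first and last), intended to be faster.

-- ===== PORT A =====
-- one body-step of A's inner loop: update (left, right) at a non-space index i
def pvStepA (lr : Option Int × Option Int) (i : Int) : Option Int × Option Int :=
  ((match lr.1 with | none => some i | some l => some (min l i)),
   (match lr.2 with | none => some i | some r => some (max r i)))

-- A's 'for i, ch in enumerate(row)' loop over one row
def pvRowScan (lr : Option Int × Option Int) (row : String) : Option Int × Option Int :=
  (PySem.List.enumerate row.toList 0).foldl
    (fun lr p => if p.2 ≠ ' ' then pvStepA lr p.1 else lr) lr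

def trim_sprite_py (sprite : List String) : List String :=
  if sprite = [] then sprite else
  let rows := ((PySem.List.enumerate sprite 0).filter (fun p => PySem.Str.strip p.2 != "")).map (·.1)
  match rows with
  | [] => [" "]
  | top :: rest =>
    let bottom := rest.getLastD top
    let block := PySem.List.slice sprite (some top) (some (bottom + 1))
    let lr := block.foldl pvRowScan (none, none)
    match lr.1, lr.2 with
    | some left, some right =>
        block.map (fun row => PySem.Str.slice row (some left) (some (right + 1)))
    | _, _ => [" "]

-- ===== PORT B =====
-- 'j < len(row) and row[j] != " "'
def pvRowHit (cs : List Char) (j : Nat) : Bool :=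
  match cs[j]? with | some c => decide (c ≠ ' ') | none => false

-- 'any(... for row in block)'
def pvColHit (block : List String) (j : Nat) : Bool :=
  block.any (fun row => pvRowHit row.toList j)

def trim_sprite_py_alt (sprite : List String) : List String :=
  if sprite = [] then sprite else
  let rows := ((PySem.List.enumerate sprite 0).filter (fun p => PySem.Str.strip p.2 != "")).map (·.1)
  match rows with
  | [] => [" "]
  | top :: rest =>
    let bottom := rest.getLastD top
    let block := PySem.List.slice sprite (some top) (some (bottom + 1))
    let maxlen := block.foldl (fun m row => max m row.toList.length) 0
    let cols := (List.range maxlen).filter (pvColHit block)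
    match cols with
    | [] => [" "]
    | left :: crest =>
      let right := crest.getLastD left
      block.map (fun row => PySem.Str.slice row (some (left : Int)) (some ((right : Int) + 1)))

-- ===== PRECONDITION & SPEC =====
def Spec_trim_sprite_py (sprite : List String) (out : List String) : Prop := out = trim_sprite_py_alt sprite
instance (sprite : List String) (out : List String) : Decidable (Spec_trim_sprite_py sprite out) := by unfold Spec_trim_sprite_py; infer_instance

-- ===== CLAIM (what is proved, stated in full; the proofs are below) =====
def Claim_equal_trim_sprite_py : Prop := ∀ (sprite : List String), Dom_trim_sprite_py sprite → Spec_trim_sprite_py sprite (trim_sprite_py sprite)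

-- ===== LEMMAS AND PROOFS =====

-- indices (as Int) of the non-space characters of one row
def pvNsIdx (cs : List Char) : List Int :=
  ((PySem.List.enumerate cs 0).filter (fun p => decide (p.2 ≠ ' '))).map (·.1)

def pvJ (block : List String) : List Int := block.flatMap (fun row => pvNsIdx row.toList)

theorem pv_foldl_if_filter (l : List (Int × Char)) (lr : Option Int × Option Int) :
    l.foldl (fun lr p => if p.2 ≠ ' ' then pvStepA lr p.1 else lr) lr
      = ((l.filter (fun p => decide (p.2 ≠ ' '))).map (·.1)).foldl pvStepA lr := by
  induction l generalizing lr with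
  | nil => rfl
  | cons p t ih =>
    by_cases h : p.2 = ' '
    · rw [List.foldl_cons, if_neg (by simp [h]), List.filter_cons, if_neg (by simp [h])]
      exact ih lr
    · rw [List.foldl_cons, if_pos h, List.filter_cons, if_pos (by simp [h]),
        List.map_cons, List.foldl_cons]
      exact ih _

theorem pv_rowScan_eq (row : String) (lr : Option Int × Option Int) :
    pvRowScan lr row = (pvNsIdx row.toList).foldl pvStepA lr := by
  unfold pvRowScan pvNsIdx
  exact pv_foldl_if_filter _ _

theorem pv_blockScan_eq (block : List String) (lr : Option Int × Option Int) :
    block.foldl pvRowScan lr = (pvJ block).foldl pvStepA lr := by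
  induction block generalizing lr with
  | nil => rfl
  | cons r t ih => simp [pvJ, pv_rowScan_eq, List.foldl_append, ih, List.flatMap_cons]

theorem pv_fold_some (J : List Int) (a b : Int) :
    J.foldl pvStepA (some a, some b) = (some (J.foldl min a), some (J.foldl max b)) := by
  induction J generalizing a b with
  | nil => rfl
  | cons i t ih => simp [pvStepA, ih]

theorem pv_fold_none (J : List Int) :
    J.foldl pvStepA (none, none)
      = match J with
        | [] => (none, none)
        | x :: t => (some (t.foldl min x), some (t.foldl max x)) := by
  cases J with
  | nil => rfl
  | cons x t => simp [pvStepA, pv_fold_some]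

theorem pv_mem_nsIdx (cs : List Char) (i : Int) :
    i ∈ pvNsIdx cs ↔ ∃ j : Nat, (j : Int) = i ∧ pvRowHit cs j = true := by
  simp only [pvNsIdx, List.mem_map, List.mem_filter, PySem.List.mem_enumerate_iff]
  constructor
  · rintro ⟨p, ⟨⟨k, hk, rfl⟩, hne⟩, rfl⟩
    refine ⟨k, by simp, ?_⟩
    simp only [pvRowHit, List.getElem?_eq_getElem hk]
    simpa using hne
  · rintro ⟨j, rfl, hhit⟩
    unfold pvRowHit at hhit
    rcases hj : cs[j]? with _ | c
    · rw [hj] at hhit; cases hhit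
    · have hjlt : j < cs.length := by
        by_contra hge
        rw [List.getElem?_eq_none (by omega : cs.length ≤ j)] at hj
        cases hj
      refine ⟨((j : Int), cs[j]), ⟨⟨j, hjlt, by simp⟩, ?_⟩, by simp⟩
      have hc : cs[j] = c := by
        have := hj; rw [List.getElem?_eq_getElem hjlt] at this
        exact Option.some.inj this
      rw [hj] at hhit
      simp [hc]
      simpa using hhit

theorem pv_mem_J (block : List String) (i : Int) :
    i ∈ pvJ block ↔ ∃ j : Nat, (j : Int) = i ∧ pvColHit block j = true := by
  simp only [pvJ, List.mem_flatMap, pvColHit, List.any_eq_true]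
  constructor
  · rintro ⟨row, hrow, hi⟩
    rcases (pv_mem_nsIdx _ _).1 hi with ⟨j, rfl, hhit⟩
    exact ⟨j, rfl, row, hrow, hhit⟩
  · rintro ⟨j, rfl, row, hrow, hhit⟩
    exact ⟨row, hrow, (pv_mem_nsIdx _ _).2 ⟨j, rfl, hhit⟩⟩

theorem pv_hit_lt_maxlen (block : List String) (j : Nat) (h : pvColHit block j = true) :
    j < block.foldl (fun m row => max m row.toList.length) 0 := by
  rcases List.any_eq_true.1 h with ⟨row, hrow, hhit⟩
  have hlt : j < row.toList.length := by
    unfold pvRowHit at hhit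
    rcases hj : row.toList[j]? with _ | c
    · rw [hj] at hhit; cases hhit
    · by_contra hge
      rw [List.getElem?_eq_none (by omega : row.toList.length ≤ j)] at hj
      cases hj
  have := (PySem.List.le_foldl_max_nat block (fun row => row.toList.length) 0).2 row hrow
  omega

theorem pv_mem_cols (block : List String) (j : Nat) :
    j ∈ (List.range (block.foldl (fun m row => max m row.toList.length) 0)).filter (pvColHit block)
      ↔ pvColHit block j = true := by
  rw [List.mem_filter, List.mem_range]
  exact ⟨fun h => h.2, fun h => ⟨pv_hit_lt_maxlen block j h, h⟩⟩

theorem pv_cols_pairwise (block : List String) :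
    ((List.range (block.foldl (fun m row => max m row.toList.length) 0)).filter
      (pvColHit block)).Pairwise (· < ·) :=
  (List.pairwise_lt_range).filter _

theorem pv_sorted_head_le {c : Nat} {t : List Nat} (hp : (c :: t).Pairwise (· < ·))
    {j : Nat} (hj : j ∈ c :: t) : c ≤ j := by
  rcases List.mem_cons.1 hj with rfl | hj
  · exact le_refl _
  · exact le_of_lt ((List.pairwise_cons.1 hp).1 j hj)

theorem pv_getLastD_lastStep (d c : Nat) (t : List Nat) :
    (d :: t).getLastD c = t.getLastD d := by
  cases t <;> rfl

theorem pv_getLastD_mem (t : List Nat) (c : Nat) : t.getLastD c ∈ c :: t := by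
  induction t generalizing c with
  | nil => simp
  | cons d t ih =>
    rw [pv_getLastD_lastStep]
    rcases List.mem_cons.1 (ih d) with h | h
    · rw [h]; exact List.mem_cons_of_mem _ (List.mem_cons_self ..)
    · exact List.mem_cons_of_mem _ (List.mem_cons_of_mem _ h)

theorem pv_sorted_le_last (t : List Nat) (c : Nat) (hp : (c :: t).Pairwise (· < ·)) :
    ∀ j ∈ c :: t, j ≤ t.getLastD c := by
  induction t generalizing c with
  | nil => intro j hj; simp at hj; simp [hj]
  | cons d t ih =>
    intro j hj
    have hcd : c < d := (List.pairwise_cons.1 hp).1 d (by simp)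
    have hp' := (List.pairwise_cons.1 hp).2
    rw [pv_getLastD_lastStep]
    rcases List.mem_cons.1 hj with rfl | hj'
    · have := ih d hp' d (by simp); omega
    · exact ih d hp' j hj'

-- the core equivalence on the block: A's running min/max scan matches B's column list
theorem pv_core (block : List String) :
    (match (block.foldl pvRowScan (none, none)).1, (block.foldl pvRowScan (none, none)).2 with
     | some left, some right =>
        block.map (fun row => PySem.Str.slice row (some left) (some (right + 1)))
     | _, _ => ([" "] : List String))
    = (match (List.range (block.foldl (fun m row => max m row.toList.length) 0)).filter
          (pvColHit block) with
       | [] => ([" "] : List String)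
       | left :: crest =>
          block.map (fun row =>
            PySem.Str.slice row (some (left : Int)) (some ((crest.getLastD left : Int) + 1)))) := by
  rw [pv_blockScan_eq, pv_fold_none]
  rcases hcols : (List.range (block.foldl (fun m row => max m row.toList.length) 0)).filter
      (pvColHit block) with _ | ⟨c, crest⟩ <;> rw [hcols]
  · -- no content column anywhere: pvJ is empty too
    have hJ : pvJ block = [] := by
      rcases hJ : pvJ block with _ | ⟨x, t⟩
      · rfl
      · exfalso
        have hx : x ∈ pvJ block := by rw [hJ]; exact List.mem_cons_self ..
        rcases (pv_mem_J block x).1 hx with ⟨j, rfl, hhit⟩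
        have hjc := (pv_mem_cols block j).2 hhit
        rw [hcols] at hjc
        cases hjc
    rw [hJ]
  · -- some content: the running min/max equal the first/last content column
    have hchit : pvColHit block c = true :=
      (pv_mem_cols block c).1 (by rw [hcols]; exact List.mem_cons_self ..)
    rcases hJ : pvJ block with _ | ⟨x, t⟩
    · exfalso
      have := (pv_mem_J block (c : Int)).2 ⟨c, rfl, hchit⟩
      rw [hJ] at this
      cases this
    have hpair := pv_cols_pairwise block
    rw [hcols] at hpair
    have hJmem : ∀ i ∈ pvJ block, ∃ j : Nat, (j : Int) = i ∧ j ∈ c :: crest := by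
      intro i hi
      rcases (pv_mem_J block i).1 hi with ⟨j, rfl, hhit⟩
      have := (pv_mem_cols block j).2 hhit
      rw [hcols] at this
      exact ⟨j, rfl, this⟩
    have hcJ : ∀ j ∈ c :: crest, (j : Int) ∈ pvJ block := by
      intro j hj
      have hj' : pvColHit block j = true :=
        (pv_mem_cols block j).1 (by rw [hcols]; exact hj)
      exact (pv_mem_J block (j : Int)).2 ⟨j, rfl, hj'⟩
    have hminmem : t.foldl min x ∈ pvJ block := by
      rw [hJ]
      rcases PySem.List.foldl_min_mem t x with h | h
      · rw [h]; exact List.mem_cons_self ..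
      · exact List.mem_cons_of_mem _ h
    have hminle : ∀ y ∈ pvJ block, t.foldl min x ≤ y := by
      intro y hy; rw [hJ] at hy
      rcases List.mem_cons.1 hy with rfl | hy
      · exact (PySem.List.foldl_min_le t y).1
      · exact (PySem.List.foldl_min_le t x).2 y hy
    have hmaxmem : t.foldl max x ∈ pvJ block := by
      rw [hJ]
      rcases PySem.List.foldl_max_mem t x with h | h
      · rw [h]; exact List.mem_cons_self ..
      · exact List.mem_cons_of_mem _ h
    have hmaxge : ∀ y ∈ pvJ block, y ≤ t.foldl max x := by
      intro y hy; rw [hJ] at hy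
      rcases List.mem_cons.1 hy with rfl | hy
      · exact (PySem.List.le_foldl_max t y).1
      · exact (PySem.List.le_foldl_max t x).2 y hy
    have hmin : t.foldl min x = (c : Int) := by
      rcases hJmem _ hminmem with ⟨j, hji, hjc⟩
      have h1 : (c : Int) ≤ (j : Int) := by exact_mod_cast pv_sorted_head_le hpair hjc
      have h2 : t.foldl min x ≤ (c : Int) := hminle _ (hcJ c (List.mem_cons_self ..))
      omega
    have hmax : t.foldl max x = (crest.getLastD c : Int) := by
      rcases hJmem _ hmaxmem with ⟨j, hji, hjc⟩
      have h1 : (j : Int) ≤ (crest.getLastD c : Int) := by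
        exact_mod_cast pv_sorted_le_last crest c hpair j hjc
      have h2 : (crest.getLastD c : Int) ≤ t.foldl max x :=
        hmaxge _ (hcJ _ (pv_getLastD_mem crest c))
      omega
    show block.map (fun row => PySem.Str.slice row (some (t.foldl min x)) (some (t.foldl max x + 1)))
        = block.map (fun row =>
            PySem.Str.slice row (some (c : Int)) (some ((crest.getLastD c : Int) + 1)))
    rw [hmin, hmax]

-- ===== VERDICT (by name: the statement is the Claim_ definition above) =====
theorem trim_sprite_py_spec : Claim_equal_trim_sprite_py := by
  intro sprite _
  show trim_sprite_py sprite = trim_sprite_py_alt sprite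
  unfold trim_sprite_py trim_sprite_py_alt
  by_cases hs : sprite = []
  · simp [hs]
  · simp only [if_neg hs]
    rcases hrows : ((PySem.List.enumerate sprite 0).filter
        (fun p => PySem.Str.strip p.2 != "")).map (·.1) with _ | ⟨top, rest⟩ <;>
      rw [hrows]
    exact pv_core _
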